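-- pv_equiv track=rewrite | github.com/Ananta-dot/misr_new | verify.py | _covers_grid_closed
-- ===== SOURCE A (Python) =====
-- from typing import List, Tuple, Optional
--
-- Rect = Tuple[Tuple[int,int], Tuple[int,int]]  # ((x1,x2),(y1,y2))
--
-- def _covers_grid_closed(rects: List[Rect], pts):
--     covers = []
--     for (x,y) in pts:
--         S=[]
--         for i,((x1,x2),(y1,y2)) in enumerate(rects):
--             if (x1 <= x <= x2) and (y1 <= y <= y2):
--                 S.append(i)
--         covers.append(S)
--     return covers
-- ===== SOURCE B (Python) =====
-- def _covers_grid_closed(rects, pts):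
--     pts = list(pts)
--     hits = [(j, i)
--             for i, ((x1, x2), (y1, y2)) in enumerate(rects)
--             for j, (x, y) in enumerate(pts)
--             if x1 <= x <= x2 and y1 <= y <= y2]
--     buckets = {}
--     for j, i in hits:
--         buckets.setdefault(j, []).append(i)
--     return [buckets.get(j, []) for j in range(len(pts))]
-- ===== Notes on version B (the rewrite author's own statement) =====
-- stated objective: alternative
-- what changed: B is a staged pipeline over a different intermediate data structure: a comprehension first materializes a flat list of (point-index, rect-index) hit pairs, a second pass groups that list into a dict of per-point buckets, and the result is read out by dict lookup over range(len(pts)), instead of A's per-point inner scan appending into the growing result list.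
import Mathlib
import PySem

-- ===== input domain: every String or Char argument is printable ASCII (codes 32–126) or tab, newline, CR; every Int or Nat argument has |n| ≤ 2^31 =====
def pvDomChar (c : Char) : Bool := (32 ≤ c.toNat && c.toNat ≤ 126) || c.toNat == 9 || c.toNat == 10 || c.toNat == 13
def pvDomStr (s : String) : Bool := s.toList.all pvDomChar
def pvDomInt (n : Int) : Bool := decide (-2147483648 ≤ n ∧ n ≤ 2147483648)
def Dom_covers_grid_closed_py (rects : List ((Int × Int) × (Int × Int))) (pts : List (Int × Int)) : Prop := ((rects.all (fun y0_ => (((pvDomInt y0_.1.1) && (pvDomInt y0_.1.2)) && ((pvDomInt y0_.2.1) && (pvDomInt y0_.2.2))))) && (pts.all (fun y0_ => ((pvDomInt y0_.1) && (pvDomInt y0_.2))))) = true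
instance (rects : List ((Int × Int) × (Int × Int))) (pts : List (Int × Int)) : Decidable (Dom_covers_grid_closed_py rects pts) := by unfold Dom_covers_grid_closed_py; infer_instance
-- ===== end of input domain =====

-- B replaces A's per-point inner scan by a staged pipeline: a flat (point-index, rect-index)
-- hit list, grouped into a dict of per-point buckets, read out over range(len(pts)) (alternative).

-- ===== PORT A =====
-- literal port of A: outer loop over points, inner loop over enumerate(rects) building S
def covers_grid_closed_py (rects : List ((Int × Int) × (Int × Int))) (pts : List (Int × Int)) : List (List Int) :=
  pts.foldl (fun covers pt =>
    let S := (PySem.List.enumerate rects).foldl (fun S t =>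
      if t.2.1.1 ≤ pt.1 ∧ pt.1 ≤ t.2.1.2 ∧ t.2.2.1 ≤ pt.2 ∧ pt.2 ≤ t.2.2.2
      then S ++ [t.1] else S) []
    covers ++ [S]) []

-- ===== PORT B =====
-- literal port of B: hits = the nested comprehension of (j, i) pairs (flatMap/filterMap),
-- buckets = dict grouping via setdefault(j, []).append(i) (Dict.modify), result = lookup over range(len(pts))
def covers_grid_closed_py_alt (rects : List ((Int × Int) × (Int × Int))) (pts : List (Int × Int)) : List (List Int) :=
  let hits := (PySem.List.enumerate rects).flatMap (fun t =>
    (PySem.List.enumerate pts).filterMap (fun jp =>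
      if t.2.1.1 ≤ jp.2.1 ∧ jp.2.1 ≤ t.2.1.2 ∧ t.2.2.1 ≤ jp.2.2 ∧ jp.2.2 ≤ t.2.2.2
      then some (jp.1, t.1) else none))
  let buckets := hits.foldl (fun d p => d.modify p.1 ([] : List Int) (· ++ [p.2])) PySem.Dict.empty
  (PySem.List.pyRange 0 (pts.length : Int) 1).map (fun j => buckets.getD j [])

-- ===== PRECONDITION & SPEC =====
def Spec_covers_grid_closed_py (rects : List ((Int × Int) × (Int × Int))) (pts : List (Int × Int)) (out : List (List Int)) : Prop := out = covers_grid_closed_py_alt rects pts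
instance (rects : List ((Int × Int) × (Int × Int))) (pts : List (Int × Int)) (out : List (List Int)) : Decidable (Spec_covers_grid_closed_py rects pts out) := by unfold Spec_covers_grid_closed_py; infer_instance

-- ===== CLAIM (what is proved, stated in full; the proofs are below) =====
def Claim_equal_covers_grid_closed_py : Prop := ∀ (rects : List ((Int × Int) × (Int × Int))) (pts : List (Int × Int)), Dom_covers_grid_closed_py rects pts → Spec_covers_grid_closed_py rects pts (covers_grid_closed_py rects pts)

-- ===== LEMMAS AND PROOFS =====

-- A's outer append-loop is a map
theorem pv_foldl_append_map {α β : Type} (f : α → β) :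
    ∀ (xs : List α) (acc : List β),
      xs.foldl (fun covers x => covers ++ [f x]) acc = acc ++ xs.map f := by
  intro xs
  induction xs with
  | nil => simp
  | cons x xs ih => intro acc; simp [List.foldl, ih]

-- A's inner append-if loop is a flatMap of singletons
theorem pv_foldl_append_if_flatMap {α : Type} (c : α → Prop) [DecidablePred c] (f : α → Int) :
    ∀ (rs : List α) (acc : List Int),
      rs.foldl (fun S t => if c t then S ++ [f t] else S) acc
      = acc ++ rs.flatMap (fun t => if c t then [f t] else []) := by
  intro rs
  induction rs with
  | nil => simp
  | cons r rs ih =>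
    intro acc
    by_cases h : c r <;> simp [h, ih]

-- keys produced from enumerate pts s are ≥ s: filtering for a smaller key gives []
theorem pv_filter_enum_lt (P : (Int × Int) → Prop) [DecidablePred P] (v : Int) :
    ∀ (pts : List (Int × Int)) (s j : Int), j < s →
      ((PySem.List.enumerate pts s).filterMap (fun jp =>
          if P jp.2 then some (jp.1, v) else none)).filter (fun q => q.1 == j) = [] := by
  intro pts
  induction pts with
  | nil => intro s j _; simp [PySem.List.enumerate_nil]
  | cons p ps ih =>
    intro s j hj
    rw [PySem.List.enumerate_cons]
    by_cases hP : P p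
    · simp only [List.filterMap_cons, hP, if_pos, List.filter_cons]
      have : ((s, v).1 == j) = false := by simp; omega
      rw [this]
      exact ih (s + 1) j (by omega)
    · simp only [List.filterMap_cons, hP, if_neg, not_false_iff]
      exact ih (s + 1) j (by omega)

-- filtering the comprehension's per-rectangle hit list for key s + k keeps exactly point k's hit
theorem pv_filter_enum (P : (Int × Int) → Prop) [DecidablePred P] (v : Int) :
    ∀ (pts : List (Int × Int)) (s : Int) (k : Nat) (hk : k < pts.length),
      ((PySem.List.enumerate pts s).filterMap (fun jp =>
          if P jp.2 then some (jp.1, v) else none)).filter (fun q => q.1 == s + (k : Int))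
      = if P pts[k] then [(s + (k : Int), v)] else [] := by
  intro pts
  induction pts with
  | nil => intro s k hk; simp at hk
  | cons p ps ih =>
    intro s k hk
    rw [PySem.List.enumerate_cons]
    cases k with
    | zero =>
      by_cases hP : P p
      · simp only [List.filterMap_cons, hP, if_pos, List.filter_cons]
        have h0 : ((s, v).1 == s + ((0 : Nat) : Int)) = true := by simp
        rw [h0]
        rw [pv_filter_enum_lt P v ps (s + 1) (s + ((0 : Nat) : Int)) (by simp)]
        simp [hP]
      · simp only [List.filterMap_cons, hP, if_neg, not_false_iff]
        rw [pv_filter_enum_lt P v ps (s + 1) (s + ((0 : Nat) : Int)) (by simp)]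
        simp [hP]
    | succ k' =>
      have hk' : k' < ps.length := by simpa using hk
      have hkey : s + ((k' + 1 : Nat) : Int) = (s + 1) + (k' : Int) := by push_cast; ring
      by_cases hP : P p
      · simp only [List.filterMap_cons, hP, if_pos, List.filter_cons]
        have : ((s, v).1 == s + ((k' + 1 : Nat) : Int)) = false := by simp; omega
        rw [this, hkey, ih (s + 1) k' hk']
        simp
      · simp only [List.filterMap_cons, hP, if_neg, not_false_iff]
        rw [hkey, ih (s + 1) k' hk']
        simp

-- pointwise-equal functions give equal flatMaps
theorem pv_flatMap_congr {α β : Type} {f g : α → List β} :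
    ∀ (l : List α), (∀ x ∈ l, f x = g x) → l.flatMap f = l.flatMap g := by
  intro l
  induction l with
  | nil => intro _; rfl
  | cons x l ih =>
    intro h
    simp only [List.flatMap_cons, h x (by simp), ih (fun y hy => h y (by simp [hy]))]

-- filter then map distribute over flatMap
theorem pv_filter_map_flatMap {α β γ : Type} (g : α → List β) (P : β → Bool) (f : β → γ) :
    ∀ (l : List α), ((l.flatMap g).filter P).map f = l.flatMap (fun x => ((g x).filter P).map f) := by
  intro l
  induction l with
  | nil => rfl
  | cons x l ih => simp [List.flatMap_cons, ih]

-- ===== VERDICT (by name: the statement is the Claim_ definition above) =====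
theorem covers_grid_closed_py_spec : Claim_equal_covers_grid_closed_py := by
  intro rects pts _
  unfold Spec_covers_grid_closed_py covers_grid_closed_py covers_grid_closed_py_alt
  rw [pv_foldl_append_map]
  simp only [List.nil_append]
  simp only [PySem.Dict.getD_foldl_modify_append, PySem.Dict.getD_empty, List.nil_append]
  apply List.ext_getElem
  · simp [PySem.List.length_pyRange_one]
  · intro k hk1 hk2
    simp only [List.getElem_map, PySem.List.getElem_pyRange_one]
    have hk : k < pts.length := by simpa using hk1
    rw [pv_foldl_append_if_flatMap, pv_filter_map_flatMap]
    simp only [List.nil_append]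
    symm
    apply pv_flatMap_congr
    intro t _
    rw [pv_filter_enum
      (fun p => t.2.1.1 ≤ p.1 ∧ p.1 ≤ t.2.1.2 ∧ t.2.2.1 ≤ p.2 ∧ p.2 ≤ t.2.2.2) t.1 pts 0 k hk]
    by_cases h : t.2.1.1 ≤ pts[k].1 ∧ pts[k].1 ≤ t.2.1.2 ∧ t.2.2.1 ≤ pts[k].2 ∧ pts[k].2 ≤ t.2.2.2 <;>
      simp [h]
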